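-- pv_equiv track=rewrite | github.com/sofievargas/barrett-fellows | methods.py | triad_9
-- ===== SOURCE A (Python) =====
-- def triad_9 (nodes, edges):
--     #b <- a -> c <-> b
--         triads = set()
--         count = 0
--         for node_a in nodes:
--             for node_b in nodes:
--                 if node_b != node_a: #skip if they are the same node
--                     edge_one = (node_a, node_b) #a -> b
--                     inverse_edge_one = (node_b, node_a) #a <- b
--                     if edge_one in edges and inverse_edge_one not in edges:
--                         for node_c in nodes:
--                             if node_c != node_b and node_c != node_a:
--                                     edge_two = (node_a, node_c) in edges and (node_c, node_a) not in edges  #a -> c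
--                                     edge_three = (node_c, node_b) in edges and (node_b, node_c) in edges    # c <-> b
--                                     if edge_three and edge_two:
--                                         sorted_nodes = sorted([node_a, node_b, node_c])
--                                         triad = tuple(sorted_nodes)
--                                         if triad not in triads:
--                                             triads.add(triad)
--                                             count+=1
--         return count
-- ===== SOURCE B (Python) =====
-- def triad_9(nodes, edges):
--     # iterate over pairs of edges sharing source a, with O(1) set lookups,
--     # instead of all node triples with list scans
--     ns = set(nodes)
--     E = set(edges)
--     triads = set()
--     for (a, b) in edges:
--         if a in ns and b in ns and (b, a) not in E:
--             for (u, c) in edges: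
--                 if u == a and c != b and c in ns and (c, a) not in E and (c, b) in E and (b, c) in E:
--                     triads.add(tuple(sorted((a, b, c))))
--     return len(triads)
-- ===== Notes on version B (the rewrite author's own statement) =====
-- stated objective: faster
-- what changed: B iterates over pairs of edges sharing their source node (with O(1) set lookups for node and edge membership) instead of A's triple loop over all node triples with O(E) list scans per membership test.
import Mathlib
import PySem

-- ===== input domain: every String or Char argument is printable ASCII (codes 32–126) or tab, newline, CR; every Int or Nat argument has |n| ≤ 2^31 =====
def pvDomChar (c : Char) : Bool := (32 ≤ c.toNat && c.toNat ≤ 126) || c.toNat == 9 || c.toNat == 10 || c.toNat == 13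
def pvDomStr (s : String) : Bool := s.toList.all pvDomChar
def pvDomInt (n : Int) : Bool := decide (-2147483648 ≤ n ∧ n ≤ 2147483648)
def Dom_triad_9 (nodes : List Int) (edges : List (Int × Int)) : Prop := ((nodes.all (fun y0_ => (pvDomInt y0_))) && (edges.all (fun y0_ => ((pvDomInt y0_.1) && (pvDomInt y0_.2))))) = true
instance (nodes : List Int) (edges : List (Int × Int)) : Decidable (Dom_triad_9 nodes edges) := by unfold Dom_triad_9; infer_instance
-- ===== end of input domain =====

-- B iterates over pairs of edges sharing their source (with set lookups) instead of
-- over all node triples with list scans: an asymptotically faster different algorithm.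

-- ===== PORT A =====
-- inner 'for node_c in nodes' body
def pvAStepC (edges : List (Int × Int)) (node_a node_b : Int)
    (st : PySem.Set (List Int) × Int) (node_c : Int) : PySem.Set (List Int) × Int :=
  if node_c ≠ node_b ∧ node_c ≠ node_a then
    let edge_two := (node_a, node_c) ∈ edges ∧ (node_c, node_a) ∉ edges
    let edge_three := (node_c, node_b) ∈ edges ∧ (node_b, node_c) ∈ edges
    if edge_three ∧ edge_two then
      let triad := PySem.List.sorted [node_a, node_b, node_c] (fun x => x) false
      if triad ∉ st.1 then (st.1.add triad, st.2 + 1) else st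
    else st
  else st

-- 'for node_b in nodes' body
def pvAStepB (nodes : List Int) (edges : List (Int × Int)) (node_a : Int)
    (st : PySem.Set (List Int) × Int) (node_b : Int) : PySem.Set (List Int) × Int :=
  if node_b ≠ node_a then
    if (node_a, node_b) ∈ edges ∧ (node_b, node_a) ∉ edges then
      nodes.foldl (pvAStepC edges node_a node_b) st
    else st
  else st

def triad_9 (nodes : List Int) (edges : List (Int × Int)) : Int :=
  (nodes.foldl (fun st node_a => nodes.foldl (pvAStepB nodes edges node_a) st)
    ((PySem.Set.empty : PySem.Set (List Int)), (0 : Int))).2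

-- ===== PORT B =====
-- inner 'for (u, c) in edges' body
def pvBStepIn (ns : PySem.Set Int) (E : PySem.Set (Int × Int)) (a b : Int)
    (tr : PySem.Set (List Int)) (e : Int × Int) : PySem.Set (List Int) :=
  if e.1 = a ∧ e.2 ≠ b ∧ e.2 ∈ ns ∧ (e.2, a) ∉ E ∧ (e.2, b) ∈ E ∧ (b, e.2) ∈ E then
    tr.add (PySem.List.sorted [a, b, e.2] (fun x => x) false)
  else tr

-- outer 'for (a, b) in edges' body
def pvBStepOut (edges : List (Int × Int)) (ns : PySem.Set Int) (E : PySem.Set (Int × Int))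
    (tr : PySem.Set (List Int)) (e : Int × Int) : PySem.Set (List Int) :=
  if e.1 ∈ ns ∧ e.2 ∈ ns ∧ (e.2, e.1) ∉ E then
    edges.foldl (pvBStepIn ns E e.1 e.2) tr
  else tr

def triad_9_alt (nodes : List Int) (edges : List (Int × Int)) : Int :=
  let ns : PySem.Set Int := PySem.Set.ofList nodes
  let E : PySem.Set (Int × Int) := PySem.Set.ofList edges
  PySem.Set.len (edges.foldl (pvBStepOut edges ns E) (PySem.Set.empty : PySem.Set (List Int)))

-- ===== PRECONDITION & SPEC =====
def Spec_triad_9 (nodes : List Int) (edges : List (Int × Int)) (out : Int) : Prop := out = triad_9_alt nodes edges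
instance (nodes : List Int) (edges : List (Int × Int)) (out : Int) : Decidable (Spec_triad_9 nodes edges out) := by unfold Spec_triad_9; infer_instance

-- ===== CLAIM (what is proved, stated in full; the proofs are below) =====
def Claim_equal_triad_9 : Prop := ∀ (nodes : List Int) (edges : List (Int × Int)), Dom_triad_9 nodes edges → Spec_triad_9 nodes edges (triad_9 nodes edges)

-- ===== LEMMAS AND PROOFS =====

-- the triple predicate both programs test, and the triple they record
def pvSrt (a b c : Int) : List Int := PySem.List.sorted [a, b, c] (fun x => x) false

def pvCondC (edges : List (Int × Int)) (a b c : Int) : Prop :=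
  c ≠ b ∧ c ≠ a ∧ (((c, b) ∈ edges ∧ (b, c) ∈ edges) ∧ ((a, c) ∈ edges ∧ (c, a) ∉ edges))

-- generic: a foldl preserves an invariant its step preserves
theorem pvFoldlInv {α β : Type} (f : β → α → β) (P : β → Prop)
    (h : ∀ st x, P st → P (f st x)) :
    ∀ (l : List α) (st : β), P st → P (l.foldl f st) := by
  intro l
  induction l with
  | nil => intro st hst; exact hst
  | cons x t ih => intro st hst; exact ih _ (h st x hst)

def pvInv (st : PySem.Set (List Int) × Int) : Prop :=
  st.1.Nodup ∧ st.2 = (st.1.length : Int)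

theorem pvInv_stepC (edges : List (Int × Int)) (a b : Int) :
    ∀ st c, pvInv st → pvInv (pvAStepC edges a b st c) := by
  intro st c h
  simp only [pvAStepC]
  split_ifs with h1 h2 h3
  · exact h
  · refine ⟨PySem.Set.nodup_add _ _ h.1, ?_⟩
    have hl : (st.1.add (PySem.List.sorted [a, b, c] (fun x => x) false)).length
        = st.1.length + 1 := by
      simp [PySem.Set.add, PySem.Set.contains, h3]
    simp only [hl, h.2]
    push_cast
    ring
  · exact h
  · exact h

theorem pvInv_stepB (nodes : List Int) (edges : List (Int × Int)) (a : Int) :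
    ∀ st b, pvInv st → pvInv (pvAStepB nodes edges a st b) := by
  intro st b h
  unfold pvAStepB
  split_ifs with h1 h2
  · exact pvFoldlInv _ _ (pvInv_stepC edges a b) nodes st h
  all_goals exact h

-- membership characterisation of A's inner loop
theorem pvMemC (edges : List (Int × Int)) (a b : Int) :
    ∀ (l : List Int) (st : PySem.Set (List Int) × Int) (t : List Int),
      t ∈ (l.foldl (pvAStepC edges a b) st).1 ↔
        t ∈ st.1 ∨ ∃ c ∈ l, pvCondC edges a b c ∧ t = pvSrt a b c := by
  intro l
  induction l with
  | nil => intro st t; simp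
  | cons c tl ih =>
    intro st t
    rw [List.foldl_cons, ih]
    have hstep : t ∈ (pvAStepC edges a b st c).1 ↔
        t ∈ st.1 ∨ (pvCondC edges a b c ∧ t = pvSrt a b c) := by
      simp only [pvAStepC, pvCondC, pvSrt]
      split_ifs with h1 h2 h3
      · constructor
        · exact Or.inl
        · rintro (h | ⟨_, rfl⟩)
          · exact h
          · exact h3
      · rw [show ((st.1.add (PySem.List.sorted [a, b, c] (fun x => x) false), st.2 + 1) :
            PySem.Set (List Int) × Int).1
            = st.1.add (PySem.List.sorted [a, b, c] (fun x => x) false) from rfl,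
          PySem.Set.mem_add]
        constructor
        · rintro (h | rfl)
          · exact Or.inl h
          · exact Or.inr ⟨⟨h1.1, h1.2, h2⟩, rfl⟩
        · rintro (h | ⟨_, rfl⟩)
          · exact Or.inl h
          · exact Or.inr rfl
      · constructor
        · exact Or.inl
        · rintro (h | ⟨⟨_, _, hc⟩, _⟩)
          · exact h
          · exact absurd hc h2
      · constructor
        · exact Or.inl
        · rintro (h | ⟨⟨hc1, hc2, _⟩, _⟩)
          · exact h
          · exact absurd ⟨hc1, hc2⟩ h1
    rw [hstep]
    simp only [List.mem_cons]
    constructor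
    · rintro ((h | h) | ⟨c', hc', h⟩)
      · exact Or.inl h
      · exact Or.inr ⟨c, Or.inl rfl, h⟩
      · exact Or.inr ⟨c', Or.inr hc', h⟩
    · rintro (h | ⟨c', (rfl | hc'), h⟩)
      · exact Or.inl (Or.inl h)
      · exact Or.inl (Or.inr h)
      · exact Or.inr ⟨c', hc', h⟩

def pvCondB (edges : List (Int × Int)) (a b : Int) : Prop :=
  b ≠ a ∧ ((a, b) ∈ edges ∧ (b, a) ∉ edges)

theorem pvMemB (nodes : List Int) (edges : List (Int × Int)) (a : Int) :
    ∀ (l : List Int) (st : PySem.Set (List Int) × Int) (t : List Int),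
      t ∈ (l.foldl (pvAStepB nodes edges a) st).1 ↔
        t ∈ st.1 ∨ ∃ b ∈ l, pvCondB edges a b ∧
          ∃ c ∈ nodes, pvCondC edges a b c ∧ t = pvSrt a b c := by
  intro l
  induction l with
  | nil => intro st t; simp
  | cons b tl ih =>
    intro st t
    rw [List.foldl_cons, ih]
    have hstep : t ∈ (pvAStepB nodes edges a st b).1 ↔
        t ∈ st.1 ∨ (pvCondB edges a b ∧ ∃ c ∈ nodes, pvCondC edges a b c ∧ t = pvSrt a b c) := by
      unfold pvAStepB pvCondB
      split_ifs with h1 h2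
      · rw [pvMemC]
        constructor
        · rintro (h | h)
          · exact Or.inl h
          · exact Or.inr ⟨⟨h1, h2⟩, h⟩
        · rintro (h | ⟨_, h⟩)
          · exact Or.inl h
          · exact Or.inr h
      · constructor
        · exact Or.inl
        · rintro (h | ⟨⟨hb, he⟩, _⟩)
          · exact h
          · exact absurd he h2
      · constructor
        · exact Or.inl
        · rintro (h | ⟨⟨hb, he⟩, _⟩)
          · exact h
          · exact absurd hb h1
    rw [hstep]
    simp only [List.mem_cons]
    constructor
    · rintro ((h | h) | ⟨b', hb', h⟩)
      · exact Or.inl h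
      · exact Or.inr ⟨b, Or.inl rfl, h⟩
      · exact Or.inr ⟨b', Or.inr hb', h⟩
    · rintro (h | ⟨b', (rfl | hb'), h⟩)
      · exact Or.inl (Or.inl h)
      · exact Or.inl (Or.inr h)
      · exact Or.inr ⟨b', hb', h⟩

theorem pvMemA (nodes : List Int) (edges : List (Int × Int)) :
    ∀ (l : List Int) (st : PySem.Set (List Int) × Int) (t : List Int),
      t ∈ (l.foldl (fun st node_a => nodes.foldl (pvAStepB nodes edges node_a) st) st).1 ↔
        t ∈ st.1 ∨ ∃ a ∈ l, ∃ b ∈ nodes, pvCondB edges a b ∧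
          ∃ c ∈ nodes, pvCondC edges a b c ∧ t = pvSrt a b c := by
  intro l
  induction l with
  | nil => intro st t; simp
  | cons a tl ih =>
    intro st t
    rw [List.foldl_cons, ih, pvMemB]
    simp only [List.mem_cons]
    constructor
    · rintro ((h | h) | ⟨a', ha', h⟩)
      · exact Or.inl h
      · exact Or.inr ⟨a, Or.inl rfl, h⟩
      · exact Or.inr ⟨a', Or.inr ha', h⟩
    · rintro (h | ⟨a', (rfl | ha'), h⟩)
      · exact Or.inl (Or.inl h)
      · exact Or.inl (Or.inr h)
      · exact Or.inr ⟨a', ha', h⟩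

-- B-side membership characterisation
theorem pvMemBIn (ns : PySem.Set Int) (E : PySem.Set (Int × Int)) (a b : Int) :
    ∀ (l : List (Int × Int)) (tr : PySem.Set (List Int)) (t : List Int),
      t ∈ l.foldl (pvBStepIn ns E a b) tr ↔
        t ∈ tr ∨ ∃ e ∈ l, (e.1 = a ∧ e.2 ≠ b ∧ e.2 ∈ ns ∧ (e.2, a) ∉ E ∧ (e.2, b) ∈ E ∧ (b, e.2) ∈ E)
          ∧ t = pvSrt a b e.2 := by
  intro l
  induction l with
  | nil => intro tr t; simp
  | cons e tl ih =>
    intro tr t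
    rw [List.foldl_cons, ih]
    have hstep : t ∈ pvBStepIn ns E a b tr e ↔
        t ∈ tr ∨ ((e.1 = a ∧ e.2 ≠ b ∧ e.2 ∈ ns ∧ (e.2, a) ∉ E ∧ (e.2, b) ∈ E ∧ (b, e.2) ∈ E)
          ∧ t = pvSrt a b e.2) := by
      unfold pvBStepIn pvSrt
      split_ifs with h1
      · rw [PySem.Set.mem_add]
        constructor
        · rintro (h | h)
          · exact Or.inl h
          · exact Or.inr ⟨h1, h⟩
        · rintro (h | ⟨_, h⟩)
          · exact Or.inl h
          · exact Or.inr h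
      · constructor
        · exact Or.inl
        · rintro (h | ⟨hc, _⟩)
          · exact h
          · exact absurd hc h1
    rw [hstep]
    simp only [List.mem_cons]
    constructor
    · rintro ((h | h) | ⟨e', he', h⟩)
      · exact Or.inl h
      · exact Or.inr ⟨e, Or.inl rfl, h⟩
      · exact Or.inr ⟨e', Or.inr he', h⟩
    · rintro (h | ⟨e', (rfl | he'), h⟩)
      · exact Or.inl (Or.inl h)
      · exact Or.inl (Or.inr h)
      · exact Or.inr ⟨e', he', h⟩

theorem pvMemBOut (edges : List (Int × Int)) (ns : PySem.Set Int) (E : PySem.Set (Int × Int)) :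
    ∀ (l : List (Int × Int)) (tr : PySem.Set (List Int)) (t : List Int),
      t ∈ l.foldl (pvBStepOut edges ns E) tr ↔
        t ∈ tr ∨ ∃ e ∈ l, (e.1 ∈ ns ∧ e.2 ∈ ns ∧ (e.2, e.1) ∉ E) ∧
          ∃ e2 ∈ edges, (e2.1 = e.1 ∧ e2.2 ≠ e.2 ∧ e2.2 ∈ ns ∧ (e2.2, e.1) ∉ E ∧
            (e2.2, e.2) ∈ E ∧ (e.2, e2.2) ∈ E) ∧ t = pvSrt e.1 e.2 e2.2 := by
  intro l
  induction l with
  | nil => intro tr t; simp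
  | cons e tl ih =>
    intro tr t
    rw [List.foldl_cons, ih]
    have hstep : t ∈ pvBStepOut edges ns E tr e ↔
        t ∈ tr ∨ ((e.1 ∈ ns ∧ e.2 ∈ ns ∧ (e.2, e.1) ∉ E) ∧
          ∃ e2 ∈ edges, (e2.1 = e.1 ∧ e2.2 ≠ e.2 ∧ e2.2 ∈ ns ∧ (e2.2, e.1) ∉ E ∧
            (e2.2, e.2) ∈ E ∧ (e.2, e2.2) ∈ E) ∧ t = pvSrt e.1 e.2 e2.2) := by
      unfold pvBStepOut
      split_ifs with h1
      · rw [pvMemBIn]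
        constructor
        · rintro (h | h)
          · exact Or.inl h
          · exact Or.inr ⟨h1, h⟩
        · rintro (h | ⟨_, h⟩)
          · exact Or.inl h
          · exact Or.inr h
      · constructor
        · exact Or.inl
        · rintro (h | ⟨hc, _⟩)
          · exact h
          · exact absurd hc h1
    rw [hstep]
    simp only [List.mem_cons]
    constructor
    · rintro ((h | h) | ⟨e', he', h⟩)
      · exact Or.inl h
      · exact Or.inr ⟨e, Or.inl rfl, h⟩
      · exact Or.inr ⟨e', Or.inr he', h⟩
    · rintro (h | ⟨e', (rfl | he'), h⟩)
      · exact Or.inl (Or.inl h)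
      · exact Or.inl (Or.inr h)
      · exact Or.inr ⟨e', he', h⟩

-- the two characterisations describe the same set of triples
theorem pvPredEquiv (nodes : List Int) (edges : List (Int × Int)) (t : List Int) :
    (∃ a ∈ nodes, ∃ b ∈ nodes, pvCondB edges a b ∧
        ∃ c ∈ nodes, pvCondC edges a b c ∧ t = pvSrt a b c) ↔
    (∃ e ∈ edges, (e.1 ∈ PySem.Set.ofList nodes ∧ e.2 ∈ PySem.Set.ofList nodes ∧
        (e.2, e.1) ∉ PySem.Set.ofList edges) ∧
      ∃ e2 ∈ edges, (e2.1 = e.1 ∧ e2.2 ≠ e.2 ∧ e2.2 ∈ PySem.Set.ofList nodes ∧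
        (e2.2, e.1) ∉ PySem.Set.ofList edges ∧
        (e2.2, e.2) ∈ PySem.Set.ofList edges ∧ (e.2, e2.2) ∈ PySem.Set.ofList edges) ∧
      t = pvSrt e.1 e.2 e2.2) := by
  simp only [PySem.Set.mem_ofList]
  constructor
  · rintro ⟨a, ha, b, hb, ⟨hba, hab, hnba⟩, c, hc, ⟨hcb, hca, ⟨h3, h3'⟩, ⟨h2, h2'⟩⟩, ht⟩
    exact ⟨(a, b), hab, ⟨ha, hb, hnba⟩, (a, c), h2, ⟨rfl, hcb, hc, h2', h3, h3'⟩, ht⟩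
  · rintro ⟨⟨a, b⟩, hab, ⟨ha, hb, hnba⟩, ⟨u, c⟩, hac, ⟨hu, hcb, hc, hnca, h3, h3'⟩, ht⟩
    dsimp only at ha hb hnba hu hcb hc hnca h3 h3' ht
    rw [hu] at hac
    refine ⟨a, ha, b, hb, ⟨?_, hab, hnba⟩, c, hc, ⟨hcb, ?_, ⟨h3, h3'⟩, ⟨hac, hnca⟩⟩, ht⟩
    · rintro rfl; exact hnba hab
    · rintro rfl; exact hnca hac

theorem pvBNodup (edges : List (Int × Int)) (ns : PySem.Set Int) (E : PySem.Set (Int × Int)) :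
    (edges.foldl (pvBStepOut edges ns E) (PySem.Set.empty : PySem.Set (List Int))).Nodup := by
  refine pvFoldlInv _ (fun tr : PySem.Set (List Int) => tr.Nodup) ?_ edges _ List.nodup_nil
  intro tr e h
  unfold pvBStepOut
  split_ifs with h1
  · refine pvFoldlInv _ (fun tr : PySem.Set (List Int) => tr.Nodup) ?_ edges tr h
    intro tr' e' h'
    unfold pvBStepIn
    split_ifs with h2
    · exact PySem.Set.nodup_add _ _ h'
    · exact h'
  · exact h

-- ===== VERDICT (by name: the statement is the Claim_ definition above) =====
theorem triad_9_spec : Claim_equal_triad_9 := by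
  unfold Claim_equal_triad_9 Spec_triad_9
  intro nodes edges _
  simp only [triad_9, triad_9_alt, PySem.Set.len]
  set A := nodes.foldl (fun st node_a => nodes.foldl (pvAStepB nodes edges node_a) st)
    ((PySem.Set.empty : PySem.Set (List Int)), (0 : Int)) with hA
  set B := edges.foldl (pvBStepOut edges (PySem.Set.ofList nodes) (PySem.Set.ofList edges))
    (PySem.Set.empty : PySem.Set (List Int)) with hB
  have hInv : pvInv A := by
    refine pvFoldlInv _ pvInv ?_ nodes _ ⟨List.nodup_nil, rfl⟩
    intro st a h
    exact pvFoldlInv _ pvInv (pvInv_stepB nodes edges a) nodes st h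
  have hmem : ∀ t, t ∈ A.1 ↔ t ∈ B := by
    intro t
    rw [hA, hB, pvMemA, pvMemBOut]
    simp only [PySem.Set.empty, List.not_mem_nil, false_or]
    exact pvPredEquiv nodes edges t
  have hperm : A.1.Perm B :=
    (List.perm_ext_iff_of_nodup hInv.1 (pvBNodup edges _ _)).2 hmem
  rw [hInv.2]
  exact_mod_cast congrArg (fun n : Nat => (n : Int)) hperm.length_eq
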